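-- pv_equiv track=rewrite | github.com/ratschlab/metagraph | metagraph/scripts/kraken_2_metagraph.py | get_prediction_topology
-- ===== SOURCE A (Python) =====
-- def get_prediction_topology(curr_taxid: int, expected_taxid: int, taxo_root:int, taxo_parent:{int, int}, dist_to_root: int):
--     dist_to_expected = 0
--     aux_taxid = curr_taxid
--     while aux_taxid != expected_taxid:
--         if aux_taxid == taxo_root:
--             break
--         aux_taxid = taxo_parent[aux_taxid]
--         dist_to_expected += 1
--     if aux_taxid == expected_taxid:
--         return dist_to_expected + dist_to_root
--
--     aux_tax = expected_taxid
--     dist_to_expected = 0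
--     while aux_tax != curr_taxid:
--         if aux_tax == taxo_root:
--             break
--         aux_tax = taxo_parent[aux_tax]
--         dist_to_expected += 1
--     if curr_taxid == aux_tax:
--         return dist_to_root - dist_to_expected
--     return 18
-- ===== SOURCE B (Python) =====
-- def get_prediction_topology(curr_taxid: int, expected_taxid: int, taxo_root: int, taxo_parent: {int, int}, dist_to_root: int):
--     cap = len(taxo_parent) + 1
--     # full ancestor -> distance table for curr_taxid (itself at 0), up to and including
--     # the root; the queried taxid may be absent from the table, and the cap keeps a
--     # cyclic table from looping
--     anc = {}
--     taxid, dist = curr_taxid, 0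
--     for _ in range(cap):
--         anc.setdefault(taxid, dist)
--         if taxid == taxo_root or taxid not in taxo_parent:
--             break
--         taxid, dist = taxo_parent[taxid], dist + 1
--     if expected_taxid in anc:
--         return anc[expected_taxid] + dist_to_root
--     # the same table for expected_taxid, walked through the taxonomy proper
--     anc, taxid, dist = {}, expected_taxid, 0
--     for _ in range(cap):
--         anc.setdefault(taxid, dist)
--         if taxid == taxo_root:
--             break
--         taxid, dist = taxo_parent[taxid], dist + 1
--     if curr_taxid in anc:
--         return dist_to_root - anc[curr_taxid]
--     return 18
-- ===== Notes on version B (the rewrite author's own statement) =====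
-- stated objective: alternative
-- what changed: Instead of A's two early-exit pointer-chasing loops, B builds per endpoint the complete ancestor-to-distance table (node itself at 0, up to and including the root, capped at len(taxo_parent)+1 steps so a cyclic table cannot loop) and answers by dictionary lookup.
import Mathlib
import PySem

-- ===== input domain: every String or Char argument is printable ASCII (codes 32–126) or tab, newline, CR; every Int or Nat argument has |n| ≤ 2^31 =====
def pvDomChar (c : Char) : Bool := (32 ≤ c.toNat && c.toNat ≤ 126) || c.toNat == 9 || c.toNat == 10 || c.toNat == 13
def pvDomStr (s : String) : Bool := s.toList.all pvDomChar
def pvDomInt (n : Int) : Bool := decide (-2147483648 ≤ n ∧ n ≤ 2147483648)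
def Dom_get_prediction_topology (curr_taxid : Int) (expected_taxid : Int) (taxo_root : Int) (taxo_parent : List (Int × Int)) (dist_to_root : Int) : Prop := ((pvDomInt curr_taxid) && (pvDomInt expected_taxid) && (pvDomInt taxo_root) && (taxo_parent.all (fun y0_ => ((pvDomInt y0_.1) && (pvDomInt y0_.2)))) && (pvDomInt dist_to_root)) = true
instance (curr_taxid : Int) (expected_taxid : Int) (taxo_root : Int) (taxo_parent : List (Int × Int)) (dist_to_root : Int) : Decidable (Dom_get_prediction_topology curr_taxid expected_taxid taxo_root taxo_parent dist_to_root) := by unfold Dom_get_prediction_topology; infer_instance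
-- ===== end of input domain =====

-- B replaces A's two early-exit parent-chasing loops by building, per endpoint, the full
-- ancestor→distance table up to and including the root, then answering by table lookup
-- (objective: alternative decomposition, same cost).


-- ===== PORT A =====
-- A's while loop: stop when aux = target (checked first) or aux = taxo_root, else step to
-- the parent; fuel bounds the unbounded Python loop (`none` = KeyError or fuel exhausted,
-- both outside Pre_ below: A's first hit of target/root always lies within the fuel).
def climbA (taxo_parent : List (Int × Int)) (target taxo_root : Int) :
    Nat → Int → Int → Option (Int × Int)
  | 0, _, _ => none
  | n + 1, aux, d =>
    if aux = target then some (aux, d)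
    else if aux = taxo_root then some (aux, d)
    else
      match PySem.Dict.get? (PySem.Dict.mk taxo_parent) aux with
      | none => none
      | some p => climbA taxo_parent target taxo_root n p (d + 1)

def get_prediction_topology (curr_taxid : Int) (expected_taxid : Int) (taxo_root : Int) (taxo_parent : List (Int × Int)) (dist_to_root : Int) : Int :=
  match climbA taxo_parent expected_taxid taxo_root (taxo_parent.length + 1) curr_taxid 0 with
  | none => 0   -- unreachable under Pre_
  | some (aux, d) =>
    if aux = expected_taxid then d + dist_to_root
    else
      match climbA taxo_parent curr_taxid taxo_root (taxo_parent.length + 1) expected_taxid 0 with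
      | none => 0   -- unreachable under Pre_
      | some (aux2, d2) =>
        if curr_taxid = aux2 then dist_to_root - d2 else 18

-- ===== PORT B =====
-- Source B's first 'for _ in range(len+1)' loop, literally: one setdefault per iteration,
-- stop at the root or at a taxid with no recorded parent; fuel IS the Python cap.
def ancestorTable (taxo_parent : List (Int × Int)) (taxo_root : Int) :
    Nat → Int → Int → PySem.Dict Int Int → PySem.Dict Int Int
  | 0, _, _, table => table
  | n + 1, taxid, dist, table =>
    let table' := table.setdefault taxid dist
    if taxid = taxo_root then table'
    else
      match PySem.Dict.get? (PySem.Dict.mk taxo_parent) taxid with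
      | none => table'
      | some p => ancestorTable taxo_parent taxo_root n p (dist + 1) table'

-- Source B's second loop: same capped walk but through taxo_parent proper — `none` is
-- exactly the KeyError Python raises on a taxid missing from the table (outside Pre_).
def ancestorTableStrict (taxo_parent : List (Int × Int)) (taxo_root : Int) :
    Nat → Int → Int → PySem.Dict Int Int → Option (PySem.Dict Int Int)
  | 0, _, _, table => some table
  | n + 1, taxid, dist, table =>
    let table' := table.setdefault taxid dist
    if taxid = taxo_root then some table'
    else
      match PySem.Dict.get? (PySem.Dict.mk taxo_parent) taxid with
      | none => none
      | some p => ancestorTableStrict taxo_parent taxo_root n p (dist + 1) table'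

def get_prediction_topology_alt (curr_taxid : Int) (expected_taxid : Int) (taxo_root : Int) (taxo_parent : List (Int × Int)) (dist_to_root : Int) : Int :=
  match (ancestorTable taxo_parent taxo_root (taxo_parent.length + 1) curr_taxid 0 PySem.Dict.empty).get? expected_taxid with
  | some e => e + dist_to_root
  | none =>
    match ancestorTableStrict taxo_parent taxo_root (taxo_parent.length + 1) expected_taxid 0 PySem.Dict.empty with
    | none => 0   -- unreachable under Pre_ (KeyError in Python)
    | some anc2 =>
      match anc2.get? curr_taxid with
      | some e2 => dist_to_root - e2
      | none => 18

-- ===== PRECONDITION & SPEC =====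
-- the parent chain of t: pvChain t k = the k-th ancestor of t (none once a lookup fails)
def pvChain (taxo_parent : List (Int × Int)) (t : Int) : Nat → Option Int
  | 0 => some t
  | k + 1 => (pvChain taxo_parent t k).bind (fun x => PySem.Dict.get? (PySem.Dict.mk taxo_parent) x)

-- Pre_ captures the inputs on which A returns normally (elsewhere A raises KeyError or
-- diverges on a cycle): the chain from curr_taxid hits expected_taxid or the root, and —
-- unless it hits expected_taxid before the root — the chain from expected_taxid reaches
-- the root.  A first hit always lies within taxo_parent.length steps (no repeats can
-- precede it), hence the bounds.
def Pre_get_prediction_topology (curr_taxid : Int) (expected_taxid : Int) (taxo_root : Int) (taxo_parent : List (Int × Int)) (dist_to_root : Int) : Prop :=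
  (∃ k ≤ taxo_parent.length, pvChain taxo_parent curr_taxid k = some expected_taxid ∨
      pvChain taxo_parent curr_taxid k = some taxo_root) ∧
  ((∃ k ≤ taxo_parent.length, pvChain taxo_parent curr_taxid k = some expected_taxid ∧
      ∀ j < k, pvChain taxo_parent curr_taxid j ≠ some taxo_root) ∨
   (∃ k ≤ taxo_parent.length, pvChain taxo_parent expected_taxid k = some taxo_root))
instance (curr_taxid : Int) (expected_taxid : Int) (taxo_root : Int) (taxo_parent : List (Int × Int)) (dist_to_root : Int) : Decidable (Pre_get_prediction_topology curr_taxid expected_taxid taxo_root taxo_parent dist_to_root) := by unfold Pre_get_prediction_topology; infer_instance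

def pvWitness_get_prediction_topology : Int × Int × Int × (List (Int × Int)) × Int :=
  (2, 3, 1, [(2, 1), (3, 1)], 5)

def Spec_get_prediction_topology (curr_taxid : Int) (expected_taxid : Int) (taxo_root : Int) (taxo_parent : List (Int × Int)) (dist_to_root : Int) (out : Int) : Prop := out = get_prediction_topology_alt curr_taxid expected_taxid taxo_root taxo_parent dist_to_root
instance (curr_taxid : Int) (expected_taxid : Int) (taxo_root : Int) (taxo_parent : List (Int × Int)) (dist_to_root : Int) (out : Int) : Decidable (Spec_get_prediction_topology curr_taxid expected_taxid taxo_root taxo_parent dist_to_root out) := by unfold Spec_get_prediction_topology; infer_instance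

-- ===== CLAIM (what is proved, stated in full; the proofs are below) =====
def Claim_equal_get_prediction_topology : Prop := ∀ (curr_taxid : Int) (expected_taxid : Int) (taxo_root : Int) (taxo_parent : List (Int × Int)) (dist_to_root : Int), Dom_get_prediction_topology curr_taxid expected_taxid taxo_root taxo_parent dist_to_root → Pre_get_prediction_topology curr_taxid expected_taxid taxo_root taxo_parent dist_to_root → Spec_get_prediction_topology curr_taxid expected_taxid taxo_root taxo_parent dist_to_root (get_prediction_topology curr_taxid expected_taxid taxo_root taxo_parent dist_to_root)

-- ===== LEMMAS AND PROOFS =====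

-- front decomposition of the parent chain
lemma pvChain_succ_front (taxo_parent : List (Int × Int)) (t : Int) (k : Nat) :
    pvChain taxo_parent t (k + 1)
      = (PySem.Dict.get? (PySem.Dict.mk taxo_parent) t).bind
          (fun p => pvChain taxo_parent p k) := by
  induction k with
  | zero => simp [pvChain]
  | succ k ih =>
      show (pvChain taxo_parent t (k + 1)).bind _ = _
      rw [ih]
      cases PySem.Dict.get? (PySem.Dict.mk taxo_parent) t with
      | none => rfl
      | some p => rfl

-- entries already in the table survive the rest of the walk (setdefault never overwrites)
lemma ancestorTable_preserves (taxo_parent : List (Int × Int)) (taxo_root : Int) :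
    ∀ (n : Nat) (aux d : Int) (acc : PySem.Dict Int Int),
      ∀ (x v : Int), acc.get? x = some v →
        (ancestorTable taxo_parent taxo_root n aux d acc).get? x = some v := by
  intro n
  induction n with
  | zero => intro aux d acc x v hx; exact hx
  | succ n ih =>
      intro aux d acc x v hx
      have hx' : (acc.setdefault aux d).get? x = some v := by
        by_cases hc : acc.contains aux = true
        · rw [PySem.Dict.setdefault_of_contains _ _ hc]; exact hx
        · rw [PySem.Dict.setdefault_of_not_contains _ _ (by simpa using hc)]
          have hxa : x ≠ aux := by
            intro hxe
            have : acc.contains aux = true := by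
              rw [PySem.Dict.contains_eq_isSome_get?, ← hxe, hx]; rfl
            exact hc this
          rw [PySem.Dict.get?_insert]
          simp [hxa, hx]
      simp only [ancestorTable]
      by_cases hr : aux = taxo_root
      · rw [if_pos hr]; exact hx'
      · rw [if_neg hr]
        cases hp : PySem.Dict.get? (PySem.Dict.mk taxo_parent) aux with
        | none => exact hx'
        | some p => exact ih p (d + 1) _ x v hx'

-- A's loop succeeds once its chain hits the target or the root within the fuel
lemma climbA_isSome (taxo_parent : List (Int × Int)) (target taxo_root : Int) :
    ∀ (n : Nat) (aux d : Int),
      (∃ k, k < n ∧ (pvChain taxo_parent aux k = some target ∨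
                     pvChain taxo_parent aux k = some taxo_root)) →
      ∃ r e, climbA taxo_parent target taxo_root n aux d = some (r, e) := by
  intro n
  induction n with
  | zero => intro aux d ⟨k, hk, _⟩; omega
  | succ n ih =>
      intro aux d ⟨k, hk, hck⟩
      by_cases ht : aux = target
      · exact ⟨aux, d, by simp [climbA, ht]⟩
      · by_cases hr : aux = taxo_root
        · exact ⟨aux, d, by simp [climbA, hr]⟩
        · have hk1 : 1 ≤ k := by
            rcases Nat.eq_zero_or_pos k with h0 | h1
            · subst h0
              simp [pvChain] at hck
              rcases hck with h | h
              · exact absurd h ht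
              · exact absurd h hr
            · exact h1
          obtain ⟨k', rfl⟩ : ∃ k', k = k' + 1 := ⟨k - 1, by omega⟩
          rw [pvChain_succ_front] at hck
          cases hp : PySem.Dict.get? (PySem.Dict.mk taxo_parent) aux with
          | none => rw [hp] at hck; simp at hck
          | some p =>
              rw [hp] at hck; simp at hck
              obtain ⟨r, e, hre⟩ := ih p (d + 1) ⟨k', by omega, hck⟩
              refine ⟨r, e, ?_⟩
              simp only [climbA, ht, hr, if_false, hp]
              exact hre
-- if the chain hits the target with no earlier root, A's loop exits AT the target
lemma climbA_exits_at_target (taxo_parent : List (Int × Int)) (target taxo_root : Int) :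
    ∀ (n : Nat) (aux d : Int) (k : Nat),
      k < n → pvChain taxo_parent aux k = some target →
      (∀ j, j < k → pvChain taxo_parent aux j ≠ some taxo_root) →
      ∃ e, climbA taxo_parent target taxo_root n aux d = some (target, e) := by
  intro n
  induction n with
  | zero => intro aux d k hk _ _; omega
  | succ n ih =>
      intro aux d k hk hck hnr
      by_cases ht : aux = target
      · exact ⟨d, by simp [climbA, ht]⟩
      · have hk1 : 1 ≤ k := by
          rcases Nat.eq_zero_or_pos k with h0 | h1
          · subst h0; simp [pvChain] at hck; exact absurd hck ht
          · exact h1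
        have hr : aux ≠ taxo_root := by
          intro h
          exact hnr 0 (by omega) (by simp [pvChain, h])
        obtain ⟨k', rfl⟩ : ∃ k', k = k' + 1 := ⟨k - 1, by omega⟩
        rw [pvChain_succ_front] at hck
        cases hp : PySem.Dict.get? (PySem.Dict.mk taxo_parent) aux with
        | none => rw [hp] at hck; simp at hck
        | some p =>
            rw [hp] at hck; simp at hck
            have hnr' : ∀ j, j < k' → pvChain taxo_parent p j ≠ some taxo_root := by
              intro j hj h
              refine hnr (j + 1) (by omega) ?_
              rw [pvChain_succ_front, hp]
              simpa using h
            obtain ⟨e, he⟩ := ih p (d + 1) k' (by omega) hck hnr'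
            refine ⟨e, ?_⟩
            simp only [climbA, ht, hr, if_false, hp]
            exact he

-- main invariant: whenever A's loop returns, B's table knows the target exactly when the
-- loop exited at the target, with the same recorded distance
lemma main_rel (taxo_parent : List (Int × Int)) (taxo_root target : Int) :
    ∀ (n : Nat) (aux d : Int) (acc : PySem.Dict Int Int),
      acc.get? target = none →
      ∀ (r e : Int), climbA taxo_parent target taxo_root n aux d = some (r, e) →
        ((r = target →
            (ancestorTable taxo_parent taxo_root n aux d acc).get? target = some e) ∧
         (r ≠ target →
            (ancestorTable taxo_parent taxo_root n aux d acc).get? target = none)) := by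
  intro n
  induction n with
  | zero => intro aux d acc hacc r e h; simp [climbA] at h
  | succ n ih =>
      intro aux d acc hacc r e h
      have hsd : ∀ (x : Int), x ≠ target →
          (acc.setdefault x d).get? target = none := by
        intro x hx
        by_cases hc : acc.contains x = true
        · rw [PySem.Dict.setdefault_of_contains _ _ hc]; exact hacc
        · rw [PySem.Dict.setdefault_of_not_contains _ _ (by simpa using hc)]
          rw [PySem.Dict.get?_insert]
          simp [hacc]
          exact fun h => hx h.symm
      by_cases ht : aux = target
      · -- A exits here with (target, d); B records target ↦ d, which survives the walk
        have hsome : climbA taxo_parent target taxo_root (n + 1) aux d = some (aux, d) := by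
          simp [climbA, ht]
        rw [hsome] at h
        injection h with hpair
        injection hpair with h1 h2
        subst h1; subst h2
        have hget : (acc.setdefault aux d).get? target = some d := by
          rw [ht, PySem.Dict.get?_setdefault_self, hacc]; rfl
        constructor
        · intro _
          simp only [ancestorTable]
          by_cases hr : aux = taxo_root
          · rw [if_pos hr]; exact hget
          · rw [if_neg hr]
            cases hp : PySem.Dict.get? (PySem.Dict.mk taxo_parent) aux with
            | none => exact hget
            | some p =>
                exact ancestorTable_preserves taxo_parent taxo_root n p (d + 1) _
                  target d hget
        · intro hcon; exact absurd ht hcon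
      · by_cases hr : aux = taxo_root
        · -- both stop at the root without having seen the target
          have hsome : climbA taxo_parent target taxo_root (n + 1) aux d = some (aux, d) := by
            simp [climbA, hr]
          rw [hsome] at h
          injection h with hpair
          injection hpair with h1 h2
          subst h1; subst h2
          constructor
          · intro hcon; exact absurd hcon ht
          · intro _
            simp only [ancestorTable]
            rw [if_pos hr]
            exact hsd aux ht
        · -- both step to the parent
          simp only [climbA, ht, hr, if_false] at h
          cases hp : PySem.Dict.get? (PySem.Dict.mk taxo_parent) aux with
          | none => rw [hp] at h; exact absurd h (by simp)
          | some p =>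
              rw [hp] at h
              have := ih p (d + 1) (acc.setdefault aux d) (hsd aux ht) r e h
              simpa only [ancestorTable, ht, hr, if_false, hp] using this

-- strict-walk versions of the three table lemmas (second walk: `none` = KeyError)
lemma strictTable_preserves (taxo_parent : List (Int × Int)) (taxo_root : Int) :
    ∀ (n : Nat) (aux d : Int) (acc anc : PySem.Dict Int Int),
      ancestorTableStrict taxo_parent taxo_root n aux d acc = some anc →
      ∀ (x v : Int), acc.get? x = some v → anc.get? x = some v := by
  intro n
  induction n with
  | zero =>
      intro aux d acc anc h x v hx
      simp only [ancestorTableStrict] at h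
      injection h with h; rw [← h]; exact hx
  | succ n ih =>
      intro aux d acc anc h x v hx
      have hx' : (acc.setdefault aux d).get? x = some v := by
        by_cases hc : acc.contains aux = true
        · rw [PySem.Dict.setdefault_of_contains _ _ hc]; exact hx
        · rw [PySem.Dict.setdefault_of_not_contains _ _ (by simpa using hc)]
          have hxa : x ≠ aux := by
            intro hxe
            have : acc.contains aux = true := by
              rw [PySem.Dict.contains_eq_isSome_get?, ← hxe, hx]; rfl
            exact hc this
          rw [PySem.Dict.get?_insert]
          simp [hxa, hx]
      simp only [ancestorTableStrict] at h
      by_cases hr : aux = taxo_root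
      · rw [if_pos hr] at h
        injection h with h; rw [← h]; exact hx'
      · rw [if_neg hr] at h
        cases hp : PySem.Dict.get? (PySem.Dict.mk taxo_parent) aux with
        | none => rw [hp] at h; exact absurd h (by simp)
        | some p =>
            rw [hp] at h
            exact ih p (d + 1) _ anc h x v hx'

-- the strict walk succeeds whenever the chain reaches the root within the fuel
lemma strictTable_isSome (taxo_parent : List (Int × Int)) (taxo_root : Int) :
    ∀ (n : Nat) (aux d : Int) (acc : PySem.Dict Int Int),
      (∃ k, k < n ∧ pvChain taxo_parent aux k = some taxo_root) →
      ∃ anc, ancestorTableStrict taxo_parent taxo_root n aux d acc = some anc := by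
  intro n
  induction n with
  | zero => intro aux d acc _; exact ⟨acc, rfl⟩
  | succ n ih =>
      intro aux d acc ⟨k, hk, hck⟩
      by_cases hr : aux = taxo_root
      · refine ⟨acc.setdefault aux d, ?_⟩
        simp only [ancestorTableStrict]
        rw [if_pos hr]
      · have hk1 : 1 ≤ k := by
          rcases Nat.eq_zero_or_pos k with h0 | h1
          · subst h0; simp [pvChain] at hck; exact absurd hck hr
          · exact h1
        obtain ⟨k', rfl⟩ : ∃ k', k = k' + 1 := ⟨k - 1, by omega⟩
        rw [pvChain_succ_front] at hck
        cases hp : PySem.Dict.get? (PySem.Dict.mk taxo_parent) aux with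
        | none => rw [hp] at hck; simp at hck
        | some p =>
            rw [hp] at hck; simp at hck
            obtain ⟨anc, hanc⟩ := ih p (d + 1) (acc.setdefault aux d) ⟨k', by omega, hck⟩
            refine ⟨anc, ?_⟩
            simp only [ancestorTableStrict, hr, if_false, hp]
            exact hanc

-- main invariant for the strict walk: under a root-reaching chain, the walk returns and
-- its table knows the target exactly when A's loop exited at the target
lemma main_rel_strict (taxo_parent : List (Int × Int)) (taxo_root target : Int) :
    ∀ (n : Nat) (aux d : Int) (acc : PySem.Dict Int Int),
      acc.get? target = none →
      (∃ k, k < n ∧ pvChain taxo_parent aux k = some taxo_root) →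
      ∃ anc, ancestorTableStrict taxo_parent taxo_root n aux d acc = some anc ∧
        ∀ (r e : Int), climbA taxo_parent target taxo_root n aux d = some (r, e) →
          ((r = target → anc.get? target = some e) ∧
           (r ≠ target → anc.get? target = none)) := by
  intro n
  induction n with
  | zero => intro aux d acc _ ⟨k, hk, _⟩; omega
  | succ n ih =>
      intro aux d acc hacc hch
      obtain ⟨k, hk, hck⟩ := hch
      have hsd : ∀ (x : Int), x ≠ target →
          (acc.setdefault x d).get? target = none := by
        intro x hx
        by_cases hc : acc.contains x = true
        · rw [PySem.Dict.setdefault_of_contains _ _ hc]; exact hacc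
        · rw [PySem.Dict.setdefault_of_not_contains _ _ (by simpa using hc)]
          rw [PySem.Dict.get?_insert]
          simp [hacc]
          exact fun h => hx h.symm
      by_cases ht : aux = target
      · have hget : (acc.setdefault aux d).get? target = some d := by
          rw [ht, PySem.Dict.get?_setdefault_self, hacc]; rfl
        have hsome : climbA taxo_parent target taxo_root (n + 1) aux d = some (aux, d) := by
          simp [climbA, ht]
        by_cases hr : aux = taxo_root
        · refine ⟨acc.setdefault aux d, ?_, ?_⟩
          · simp only [ancestorTableStrict]; rw [if_pos hr]
          · intro r e h
            rw [hsome] at h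
            injection h with hpair
            injection hpair with h1 h2
            subst h1; subst h2
            exact ⟨fun _ => hget, fun hcon => absurd ht hcon⟩
        · have hk1 : 1 ≤ k := by
            rcases Nat.eq_zero_or_pos k with h0 | h1
            · subst h0; simp [pvChain] at hck; exact absurd hck hr
            · exact h1
          obtain ⟨k', rfl⟩ : ∃ k', k = k' + 1 := ⟨k - 1, by omega⟩
          rw [pvChain_succ_front] at hck
          cases hp : PySem.Dict.get? (PySem.Dict.mk taxo_parent) aux with
          | none => rw [hp] at hck; simp at hck
          | some p =>
              rw [hp] at hck; simp at hck
              obtain ⟨anc, hanc⟩ :=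
                strictTable_isSome taxo_parent taxo_root n p (d + 1)
                  (acc.setdefault aux d) ⟨k', by omega, hck⟩
              refine ⟨anc, ?_, ?_⟩
              · simp only [ancestorTableStrict, hr, if_false, hp]; exact hanc
              · intro r e h
                rw [hsome] at h
                injection h with hpair
                injection hpair with h1 h2
                subst h1; subst h2
                refine ⟨fun _ => ?_, fun hcon => absurd ht hcon⟩
                exact strictTable_preserves taxo_parent taxo_root n p (d + 1) _ anc
                  hanc target d hget
      · by_cases hr : aux = taxo_root
        · refine ⟨acc.setdefault aux d, ?_, ?_⟩
          · simp only [ancestorTableStrict]; rw [if_pos hr]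
          · intro r e h
            have hsome : climbA taxo_parent target taxo_root (n + 1) aux d
                = some (aux, d) := by
              simp [climbA, hr]
            rw [hsome] at h
            injection h with hpair
            injection hpair with h1 h2
            subst h1; subst h2
            exact ⟨fun hcon => absurd hcon ht, fun _ => hsd aux ht⟩
        · have hk1 : 1 ≤ k := by
            rcases Nat.eq_zero_or_pos k with h0 | h1
            · subst h0; simp [pvChain] at hck; exact absurd hck hr
            · exact h1
          obtain ⟨k', rfl⟩ : ∃ k', k = k' + 1 := ⟨k - 1, by omega⟩
          rw [pvChain_succ_front] at hck
          cases hp : PySem.Dict.get? (PySem.Dict.mk taxo_parent) aux with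
          | none => rw [hp] at hck; simp at hck
          | some p =>
              rw [hp] at hck; simp at hck
              obtain ⟨anc, hanc, hrel⟩ :=
                ih p (d + 1) (acc.setdefault aux d) (hsd aux ht) ⟨k', by omega, hck⟩
              refine ⟨anc, ?_, ?_⟩
              · simp only [ancestorTableStrict, hr, if_false, hp]; exact hanc
              · intro r e h
                simp only [climbA, ht, hr, if_false, hp] at h
                exact hrel r e h

-- ===== VERDICT (by name: the statement is the Claim_ definition above) =====
theorem get_prediction_topology_spec : Claim_equal_get_prediction_topology := by
  intro curr expected root parent dist _ hpre
  obtain ⟨⟨k1, hk1, hc1⟩, hsecond⟩ := hpre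
  unfold Spec_get_prediction_topology
  obtain ⟨r, e, hclimb⟩ :=
    climbA_isSome parent expected root (parent.length + 1) curr 0 ⟨k1, by omega, hc1⟩
  obtain ⟨hyes, hno⟩ :=
    main_rel parent root expected (parent.length + 1) curr 0 PySem.Dict.empty
      (by simp) r e hclimb
  unfold get_prediction_topology get_prediction_topology_alt
  simp only [hclimb]
  by_cases hre : r = expected
  · simp [hre, hyes hre]
  · simp only [hno hre, if_neg hre]
    have h2 : ∃ k ≤ parent.length, pvChain parent expected k = some root := by
      rcases hsecond with ⟨k, hk, hck, hnr⟩ | h2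
      · -- the chain hits expected before the root, so A's loop exits at expected:
        -- contradiction with hre
        obtain ⟨e', he'⟩ :=
          climbA_exits_at_target parent expected root (parent.length + 1) curr 0 k
            (by omega) hck hnr
        rw [hclimb] at he'
        injection he' with hp
        injection hp with h1 h2
        exact absurd h1 hre
      · exact h2
    obtain ⟨k2, hk2, hc2⟩ := h2
    obtain ⟨r2, e2, hclimb2⟩ :=
      climbA_isSome parent curr root (parent.length + 1) expected 0
        ⟨k2, by omega, Or.inr hc2⟩
    obtain ⟨anc2, hanc2, hrel2⟩ :=
      main_rel_strict parent root curr (parent.length + 1) expected 0 PySem.Dict.empty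
        (by simp) ⟨k2, by omega, hc2⟩
    obtain ⟨hyes2, hno2⟩ := hrel2 r2 e2 hclimb2
    simp only [hclimb2, hanc2]
    by_cases hrc : r2 = curr
    · simp [hrc, hyes2 hrc]
    · simp [hno2 hrc]
      intro h
      exact absurd h.symm hrc
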